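-- pv_equiv track=rewrite | github.com/Hans945945/My-Python-Code | c091.py | check
-- ===== SOURCE A (Python) =====
-- def check(n,a):
--     count = 0
--     last = False
--     for w in a:
--         if w in "aeiouy":
--             if not last:
--                count += 1
--             last = True
--         else:
--             last = False
--     return count == n
-- ===== SOURCE B (Python) =====
-- def check(n, a):
--     # number of maximal vowel runs = (#vowels) - (#adjacent positions where both chars are vowels)
--     s = [w in "aeiouy" for w in a]
--     return sum(s) - sum(x and y for x, y in zip(s, s[1:])) == n
-- ===== Notes on version B (the rewrite author's own statement) =====
-- stated objective: alternative
-- what changed: B drops the run-scanning state machine entirely and computes the run count by the arithmetic identity runs = #vowels - #adjacent vowel-vowel pairs, via two independent counts (a vowel count and a bigram count over zip(s, s[1:])).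
import Mathlib
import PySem

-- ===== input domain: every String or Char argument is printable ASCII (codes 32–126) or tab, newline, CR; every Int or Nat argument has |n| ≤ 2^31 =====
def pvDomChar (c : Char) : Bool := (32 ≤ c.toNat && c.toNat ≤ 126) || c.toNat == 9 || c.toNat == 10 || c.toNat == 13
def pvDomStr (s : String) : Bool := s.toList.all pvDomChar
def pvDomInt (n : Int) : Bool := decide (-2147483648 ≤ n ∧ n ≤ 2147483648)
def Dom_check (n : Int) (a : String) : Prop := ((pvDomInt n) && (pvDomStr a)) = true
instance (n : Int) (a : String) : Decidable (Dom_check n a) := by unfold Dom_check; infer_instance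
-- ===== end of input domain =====

-- B replaces A's boolean state machine by the identity runs = #vowels - #adjacent vowel-vowel pairs (two independent counts); same cost, proved equal on all inputs.


-- ===== PORT A =====
def pvVowel (w : Char) : Bool := w ∈ "aeiouy".toList

-- A: fold over the string keeping (count, last); return count == n
def check (n : Int) (a : String) : Bool :=
  (a.toList.foldl
    (fun (s : Int × Bool) w =>
      if pvVowel w then
        (if !s.2 then s.1 + 1 else s.1, true)
      else
        (s.1, false))
    (0, false)).1 == n

-- ===== PORT B =====
-- Source B: s = [w in "aeiouy" for w in a]; sum(s) - sum(x and y for x,y in zip(s, s[1:])) == n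
def check_alt (n : Int) (a : String) : Bool :=
  let s := a.toList.map pvVowel
  ((s.countP id : Int) - (((s.zip s.tail).countP (fun p => p.1 && p.2) : Nat) : Int)) == n

-- ===== PRECONDITION & SPEC =====
def Spec_check (n : Int) (a : String) (out : Bool) : Prop := out = check_alt n a
instance (n : Int) (a : String) (out : Bool) : Decidable (Spec_check n a out) := by unfold Spec_check; infer_instance

-- ===== CLAIM (what is proved, stated in full; the proofs are below) =====
def Claim_equal_check : Prop := ∀ (n : Int) (a : String), Dom_check n a → Spec_check n a (check n a)

-- ===== LEMMAS AND PROOFS =====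
-- number of adjacent true-true pairs in a boolean list (proof-side helper)
def pvPairs (s : List Bool) : Nat := (s.zip s.tail).countP (fun p => p.1 && p.2)

theorem pvPairs_cons (b c : Bool) (r : List Bool) :
    pvPairs (b :: c :: r) = (if b && c then 1 else 0) + pvPairs (c :: r) := by
  simp [pvPairs, List.countP_cons]; split_ifs <;> simp_all <;> omega

-- Invariant: A's fold from (c, last) yields c + #vowels − #adjacent vowel pairs in (last :: s)
theorem pv_fold_pairs (l : List Char) :
    ∀ (c : Int) (last : Bool),
      (l.foldl
        (fun (s : Int × Bool) w =>
          if pvVowel w then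
            (if !s.2 then s.1 + 1 else s.1, true)
          else
            (s.1, false))
        (c, last)).1
      = c + ((l.map pvVowel).countP id : Int) - (pvPairs (last :: l.map pvVowel) : Int) := by
  induction l with
  | nil => intro c last; simp [pvPairs]
  | cons w r ih =>
    intro c last
    by_cases h : pvVowel w
    · cases last <;>
        simp only [List.foldl_cons, h, if_true, Bool.not_false, Bool.not_true] <;>
        rw [ih] <;>
        simp [List.countP_cons, pvPairs_cons, h] <;> push_cast <;> ring
    · simp only [List.foldl_cons, h, if_false]
      rw [ih]
      cases last <;> simp [List.countP_cons, pvPairs_cons, h]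

theorem pvPairs_false_cons (s : List Bool) : pvPairs (false :: s) = pvPairs s := by
  cases s with
  | nil => simp [pvPairs]
  | cons c r => simp [pvPairs_cons]

-- ===== VERDICT (by name: the statement is the Claim_ definition above) =====
theorem check_spec : Claim_equal_check := by
  intro n a _
  unfold Spec_check check check_alt
  rw [pv_fold_pairs a.toList 0 false, pvPairs_false_cons]
  simp [pvPairs]
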